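-- pv_equiv track=rewrite | github.com/icatcherplus/icatcher_plus | reproduce/parsers.py | get_trial_intervals
-- ===== SOURCE A (Python) =====
-- def get_trial_intervals(start, responses):
--     """
--     gets trial ending times, in a non-inclusive manner
--      i.e. open ended interval [)
--     :param label_path: path to label file
--     :return:
--     """
--     trials_times = []
--     prev_frame = start
--     for response in responses:
--         if response[1] == 0:
--             trials_times.append([prev_frame, response[0]])
--             prev_frame = response[0]
--     return trials_times
-- ===== SOURCE B (Python) =====
-- def get_trial_intervals(start, responses):
--     # Traverse the responses BACKWARDS, keeping the pending right endpoint
--     # (the next boundary frame); emit intervals back-to-front, then flip and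
--     # prepend the initial [start, first_boundary] interval.
--     out = []
--     right = None
--     for frame, resp in reversed(responses):
--         if resp == 0:
--             if right is not None:
--                 out.append([frame, right])
--             right = frame
--     out.reverse()
--     if right is not None:
--         out.insert(0, [start, right])
--     return out
-- ===== Notes on version B (the rewrite author's own statement) =====
-- stated objective: alternative
-- what changed: B traverses the responses in reverse, carrying the pending right endpoint and building the interval list back-to-front (then flipping and prepending the start interval), instead of A's forward loop threading a running prev_frame left endpoint.
import Mathlib
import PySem

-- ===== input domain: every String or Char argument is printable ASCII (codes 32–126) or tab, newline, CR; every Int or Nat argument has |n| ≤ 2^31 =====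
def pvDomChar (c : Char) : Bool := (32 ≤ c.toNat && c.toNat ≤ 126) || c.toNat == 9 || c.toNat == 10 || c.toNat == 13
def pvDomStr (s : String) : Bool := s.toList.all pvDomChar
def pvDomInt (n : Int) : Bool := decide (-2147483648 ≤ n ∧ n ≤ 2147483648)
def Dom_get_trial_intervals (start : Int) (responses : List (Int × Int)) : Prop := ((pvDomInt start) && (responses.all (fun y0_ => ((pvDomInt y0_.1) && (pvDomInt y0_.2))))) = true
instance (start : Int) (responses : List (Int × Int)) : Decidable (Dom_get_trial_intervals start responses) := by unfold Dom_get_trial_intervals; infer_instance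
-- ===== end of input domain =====

-- B traverses the responses in reverse with a pending right endpoint, building the
-- output back-to-front, instead of A's forward loop threading prev_frame; objective: alternative.


-- ===== PORT A =====
-- forward loop over responses threading (trials_times, prev_frame)
def get_trial_intervals (start : Int) (responses : List (Int × Int)) : List (List Int) :=
  (responses.foldl
    (fun (st : List (List Int) × Int) response =>
      if response.2 = 0 then (st.1 ++ [[st.2, response.1]], response.1) else st)
    ([], start)).1

-- ===== PORT B =====
-- reversed traversal; state = (out built back-to-front, pending right endpoint)
def get_trial_intervals_alt (start : Int) (responses : List (Int × Int)) : List (List Int) :=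
  let st := responses.reverse.foldl
    (fun (st : List (List Int) × Option Int) (r : Int × Int) =>
      if r.2 = 0 then
        ((match st.2 with
          | some right => st.1 ++ [[r.1, right]]
          | none => st.1), some r.1)
      else st)
    ([], none)
  match st.2 with
  | some right => [start, right] :: st.1.reverse
  | none => st.1.reverse

-- ===== PRECONDITION & SPEC =====
def Spec_get_trial_intervals (start : Int) (responses : List (Int × Int)) (out : List (List Int)) : Prop := out = get_trial_intervals_alt start responses
instance (start : Int) (responses : List (Int × Int)) (out : List (List Int)) : Decidable (Spec_get_trial_intervals start responses out) := by unfold Spec_get_trial_intervals; infer_instance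

-- ===== CLAIM (what is proved, stated in full; the proofs are below) =====
def Claim_equal_get_trial_intervals : Prop := ∀ (start : Int) (responses : List (Int × Int)), Dom_get_trial_intervals start responses → Spec_get_trial_intervals start responses (get_trial_intervals start responses)

-- ===== LEMMAS AND PROOFS =====

-- the boundary frames (zero responses) of a list
def gtiBounds (xs : List (Int × Int)) : List Int :=
  xs.filterMap (fun r => if r.2 = 0 then some r.1 else none)

-- A's fold equals the consecutive-pair characterisation over (prev :: bounds)
theorem gti_fold_eq (responses : List (Int × Int)) :
    ∀ (acc : List (List Int)) (prev : Int),
      (responses.foldl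
        (fun (st : List (List Int) × Int) response =>
          if response.2 = 0 then (st.1 ++ [[st.2, response.1]], response.1) else st)
        (acc, prev)).1
      = acc ++ (List.zip (prev :: gtiBounds responses) (gtiBounds responses)).map
            (fun p => [p.1, p.2]) := by
  induction responses with
  | nil => intro acc prev; simp [gtiBounds]
  | cons r rs ih =>
    intro acc prev
    by_cases h : r.2 = 0
    · simp [List.foldl_cons, h, ih, gtiBounds, List.zip]
    · simp [List.foldl_cons, h, ih, gtiBounds]

-- B's reversed fold: out is the reversed list of consecutive bound pairs,
-- and the pending right endpoint is the first bound
theorem gti_rev_fold_eq (responses : List (Int × Int)) :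
    responses.reverse.foldl
      (fun (st : List (List Int) × Option Int) (r : Int × Int) =>
        if r.2 = 0 then
          ((match st.2 with
            | some right => st.1 ++ [[r.1, right]]
            | none => st.1), some r.1)
        else st)
      ([], none)
    = (((List.zip (gtiBounds responses) (gtiBounds responses).tail).map
          (fun p => [p.1, p.2])).reverse,
       (gtiBounds responses).head?) := by
  induction responses with
  | nil => simp [gtiBounds]
  | cons r rs ih =>
    simp only [List.reverse_cons, List.foldl_append, List.foldl_cons, List.foldl_nil, ih]
    by_cases h : r.2 = 0
    · have hc : gtiBounds (r :: rs) = r.1 :: gtiBounds rs := by simp [gtiBounds, h]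
      cases hb : gtiBounds rs with
      | nil => simp [h, hc, hb]
      | cons b bs => simp [h, hc, hb, List.zip]
    · have hc : gtiBounds (r :: rs) = gtiBounds rs := by simp [gtiBounds, h]
      simp [h, hc]

-- ===== VERDICT (by name: the statement is the Claim_ definition above) =====
theorem get_trial_intervals_spec : Claim_equal_get_trial_intervals := by
  intro start responses _
  unfold Spec_get_trial_intervals get_trial_intervals get_trial_intervals_alt
  rw [gti_rev_fold_eq, gti_fold_eq]
  cases hb : gtiBounds responses with
  | nil => simp
  | cons b bs => simp [List.zip]
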